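-- pv_equiv track=rewrite | github.com/CodingPenguin1/Advent-of-Code | 2023/12/Day12.py | check_arrangement
-- ===== SOURCE A (Python) =====
-- def check_arrangement(arr, groups):
--     current_group_size = 0
--     group_sizes = []
--     for i in range(len(arr)):
--         if arr[i] == '#':
--             current_group_size += 1
--         else:
--             if current_group_size > 0:
--                 group_sizes.append(current_group_size)
--                 current_group_size = 0
--     if current_group_size > 0:
--         group_sizes.append(current_group_size)
--
--     if group_sizes == groups:
--         return True
--     else:
--         return False
-- ===== SOURCE B (Python) =====
-- def check_arrangement(arr, groups):
--     # Group arr into runs of equal characters, then keep the lengths of the '#' runs.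
--     runs = []
--     i = 0
--     while i < len(arr):
--         j = i
--         while j < len(arr) and arr[j] == arr[i]:
--             j += 1
--         runs.append((arr[i], j - i))
--         i = j
--     return [n for c, n in runs if c == '#'] == groups
-- ===== Notes on version B (the rewrite author's own statement) =====
-- stated objective: alternative
-- what changed: Replaces A's counter state machine with end-of-group flush by a grouping pass that builds (char, run-length) runs and then compares the lengths of the '#' runs to groups.
import Mathlib
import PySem

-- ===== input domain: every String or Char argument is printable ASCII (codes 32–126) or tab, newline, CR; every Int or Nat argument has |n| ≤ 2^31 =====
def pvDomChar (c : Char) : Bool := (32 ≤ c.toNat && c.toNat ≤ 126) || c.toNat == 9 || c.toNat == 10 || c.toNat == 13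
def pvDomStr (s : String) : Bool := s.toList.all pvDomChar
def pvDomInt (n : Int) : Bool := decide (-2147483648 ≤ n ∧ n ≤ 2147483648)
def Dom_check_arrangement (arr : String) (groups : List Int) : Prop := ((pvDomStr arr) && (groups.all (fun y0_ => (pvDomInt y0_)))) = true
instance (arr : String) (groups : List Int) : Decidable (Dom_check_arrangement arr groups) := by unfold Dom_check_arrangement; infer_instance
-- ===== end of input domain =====

-- B groups the string into runs of equal characters then filters; alternative decomposition, same O(n) cost.

-- ===== PORT A =====
-- A's loop over arr with the counter/accumulator state, then the post-loop flush.
def aLoop : List Char → Int → List Int → List Int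
  | [], cur, acc => if cur > 0 then acc ++ [cur] else acc
  | c :: cs, cur, acc =>
      if c = '#' then aLoop cs (cur + 1) acc
      else if cur > 0 then aLoop cs 0 (acc ++ [cur]) else aLoop cs 0 acc

def check_arrangement (arr : String) (groups : List Int) : Bool :=
  decide (aLoop arr.toList 0 [] = groups)

-- ===== PORT B =====
-- inner while loop of Source B: take the run of characters equal to c
def takeRun (c : Char) : List Char → List Char × List Char
  | [] => ([], [])
  | x :: xs =>
      if x = c then
        let (r, rest) := takeRun c xs
        (x :: r, rest)
      else ([], x :: xs)

theorem takeRun_snd_length (c : Char) : ∀ cs : List Char, (takeRun c cs).2.length ≤ cs.length := by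
  intro cs
  induction cs with
  | nil => simp [takeRun]
  | cons x xs ih =>
      simp only [takeRun]
      split
      · simpa using Nat.le_succ_of_le ih
      · simp

-- outer while loop of Source B: the list of (character, run length) pairs
def bRuns : List Char → List (Char × Int)
  | [] => []
  | c :: cs =>
      let p := takeRun c cs
      (c, 1 + (p.1.length : Int)) :: bRuns p.2
termination_by l => l.length
decreasing_by
  simpa using Nat.lt_succ_of_le (takeRun_snd_length c cs)

def check_arrangement_alt (arr : String) (groups : List Int) : Bool :=
  decide (((bRuns arr.toList).filter (fun p => p.1 == '#')).map (fun p => p.2) = groups)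

-- ===== PRECONDITION & SPEC =====
def Spec_check_arrangement (arr : String) (groups : List Int) (out : Bool) : Prop := out = check_arrangement_alt arr groups
instance (arr : String) (groups : List Int) (out : Bool) : Decidable (Spec_check_arrangement arr groups out) := by unfold Spec_check_arrangement; infer_instance

-- ===== CLAIM (what is proved, stated in full; the proofs are below) =====
def Claim_equal_check_arrangement : Prop := ∀ (arr : String) (groups : List Int), Dom_check_arrangement arr groups → Spec_check_arrangement arr groups (check_arrangement arr groups)

-- ===== LEMMAS AND PROOFS =====

-- canonical "group sizes from position with cur open '#'s" function
def g : List Char → Int → List Int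
  | [], cur => if cur > 0 then [cur] else []
  | c :: cs, cur =>
      if c = '#' then g cs (cur + 1)
      else (if cur > 0 then [cur] else []) ++ g cs 0

theorem aLoop_eq_g : ∀ (l : List Char) (cur : Int) (acc : List Int), aLoop l cur acc = acc ++ g l cur := by
  intro l
  induction l with
  | nil => intro cur acc; simp [aLoop, g]; split <;> simp
  | cons c cs ih =>
      intro cur acc
      simp only [aLoop, g]
      split
      · exact ih _ _
      · split <;> simp [ih]

theorem takeRun_eq (c : Char) : ∀ cs r rest, takeRun c cs = (r, rest) →
    cs = r ++ rest ∧ (∀ x ∈ r, x = c) ∧ (∀ d ds, rest = d :: ds → d ≠ c) := by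
  intro cs
  induction cs with
  | nil => intro r rest h; simp [takeRun] at h; simp [h.1, h.2]
  | cons x xs ih =>
      intro r rest h
      simp only [takeRun] at h
      by_cases hx : x = c
      · simp only [if_pos hx] at h
        obtain ⟨r', rest', hr⟩ : ∃ r' rest', takeRun c xs = (r', rest') := ⟨_, _, rfl⟩
        rw [hr] at h
        obtain ⟨h1, h2⟩ := Prod.mk.injEq .. ▸ h
        obtain ⟨e1, e2, e3⟩ := ih r' rest' hr
        subst h1 h2
        refine ⟨by simp [e1], ?_, e3⟩
        intro y hy
        rcases List.mem_cons.mp hy with rfl | hy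
        · exact hx
        · exact e2 y hy
      · simp only [if_neg hx] at h
        obtain ⟨h1, h2⟩ := Prod.mk.injEq .. ▸ h
        subst h1; subst h2
        exact ⟨rfl, by simp, by intro d ds hd; injection hd with h3 _; exact h3 ▸ hx⟩

-- a run of '#'s just increments the open counter
theorem g_hash_run : ∀ (r rest : List Char), (∀ x ∈ r, x = '#') → ∀ k : Int,
    g (r ++ rest) k = g rest (k + r.length) := by
  intro r
  induction r with
  | nil => intro rest _ k; simp
  | cons x xs ih =>
      intro rest h k
      have hx : x = '#' := h x (by simp)
      simp only [List.cons_append, g, if_pos hx]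
      rw [ih rest (fun y hy => h y (by simp [hy])) (k + 1)]
      congr 1
      simp only [List.length_cons]
      push_cast
      ring

-- a run of non-'#'s with no open group contributes nothing
theorem g_other_run : ∀ (r rest : List Char) (c : Char), c ≠ '#' → (∀ x ∈ r, x = c) →
    g (r ++ rest) 0 = g rest 0 := by
  intro r
  induction r with
  | nil => intro rest c _ _; simp
  | cons x xs ih =>
      intro rest c hc h
      have hx : x = c := h x (by simp)
      simp only [List.cons_append, g, if_neg (hx ▸ hc)]
      simp only [show ¬ (0:Int) > 0 by omega, if_false, List.nil_append]
      exact ih rest c hc (fun y hy => h y (by simp [hy]))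

-- closing a positive open group at a non-'#' boundary (or the end) emits it
theorem g_close (rest : List Char) (m : Int) (hm : m > 0)
    (hrest : ∀ d ds, rest = d :: ds → d ≠ '#') : g rest m = m :: g rest 0 := by
  cases rest with
  | nil => simp [g, if_pos hm]
  | cons d ds =>
      have hd : d ≠ '#' := hrest d ds rfl
      simp [g, if_neg hd, if_pos hm]

def bList (l : List Char) : List Int :=
  ((bRuns l).filter (fun p => p.1 == '#')).map (fun p => p.2)

theorem bList_eq_g : ∀ (n : Nat) (l : List Char), l.length ≤ n → bList l = g l 0 := by
  intro n
  induction n with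
  | zero =>
      intro l hl
      have : l = [] := List.eq_nil_of_length_eq_zero (Nat.le_zero.mp hl)
      subst this; simp [bList, bRuns, g]
  | succ n ih =>
      intro l hl
      cases l with
      | nil => simp [bList, bRuns, g]
      | cons c cs =>
          obtain ⟨r, rest, hr⟩ : ∃ r rest, takeRun c cs = (r, rest) := ⟨_, _, rfl⟩
          obtain ⟨e1, e2, e3⟩ := takeRun_eq c cs r rest hr
          have hrestlen : rest.length ≤ n := by
            have h1 := takeRun_snd_length c cs
            rw [hr] at h1
            simp only [List.length_cons] at hl
            simp only at h1
            omega
          have hbr : bRuns (c :: cs) = (c, 1 + (r.length : Int)) :: bRuns rest := by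
            rw [bRuns.eq_def]
            simp [hr]
          by_cases hc : c = '#'
          · have hstep : g (c :: cs) 0 = g rest (1 + r.length) := by
              have h0 : g (c :: cs) 0 = g cs 1 := by simp [g, hc]
              rw [h0, e1, g_hash_run r rest (fun x hx => (e2 x hx).trans hc) 1]
            have hclose : g rest (1 + (r.length : Int)) = (1 + (r.length : Int)) :: g rest 0 := by
              refine g_close rest _ (by have := Int.natCast_nonneg r.length; omega) ?_
              intro d ds hd h
              exact e3 d ds hd (h.trans hc.symm)
            rw [hstep, hclose]
            unfold bList
            rw [hbr, List.filter_cons, if_pos (by simp [hc]), List.map_cons]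
            exact congrArg _ (ih rest hrestlen)
          · have hstep : g (c :: cs) 0 = g rest 0 := by
              have h0 : g (c :: cs) 0 = g cs 0 := by simp [g, if_neg hc]
              rw [h0, e1]
              exact g_other_run r rest c hc e2
            rw [hstep]
            unfold bList
            rw [hbr, List.filter_cons, if_neg (by simp [hc])]
            exact ih rest hrestlen

-- ===== VERDICT (by name: the statement is the Claim_ definition above) =====
theorem check_arrangement_spec : Claim_equal_check_arrangement := by
  intro arr groups _
  unfold Spec_check_arrangement check_arrangement check_arrangement_alt
  have h : aLoop arr.toList 0 [] = bList arr.toList := by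
    rw [aLoop_eq_g, List.nil_append, ← bList_eq_g arr.toList.length arr.toList le_rfl]
  rw [h]
  unfold bList
  rfl
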